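-- pv_equiv track=rewrite | github.com/MapsaBootCamp/django6_excercises | Coloring Rectangles.py | partiotion
-- ===== SOURCE A (Python) =====
-- def partiotion(lenght:int,height:int)->int:
--     """
--     @params:lenghth and height of rectangle (both int)
--
--     @return:number of minimum blue
--
--     """
--
--     area=lenght*height
--     counter=0
--     while area>0:
--         if area-3==0 or area-3>2:
--             area-=3
--             counter+=1
--
--         else:
--             area-=2
--             counter+=1
--
--     return counter
-- ===== SOURCE B (Python) =====
-- def partiotion(lenght: int, height: int) -> int:
--     # closed form: ceil(area/3) pieces, 0 for non-positive area
--     area = lenght * height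
--     if area <= 0:
--         return 0
--     return (area + 2) // 3
-- ===== Notes on version B (the rewrite author's own statement) =====
-- stated objective: faster
-- what changed: Replaced the subtract-3-or-2 while loop over the area by the closed form ceil(area/3) = (area+2)//3 (0 for non-positive area).
import Mathlib
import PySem

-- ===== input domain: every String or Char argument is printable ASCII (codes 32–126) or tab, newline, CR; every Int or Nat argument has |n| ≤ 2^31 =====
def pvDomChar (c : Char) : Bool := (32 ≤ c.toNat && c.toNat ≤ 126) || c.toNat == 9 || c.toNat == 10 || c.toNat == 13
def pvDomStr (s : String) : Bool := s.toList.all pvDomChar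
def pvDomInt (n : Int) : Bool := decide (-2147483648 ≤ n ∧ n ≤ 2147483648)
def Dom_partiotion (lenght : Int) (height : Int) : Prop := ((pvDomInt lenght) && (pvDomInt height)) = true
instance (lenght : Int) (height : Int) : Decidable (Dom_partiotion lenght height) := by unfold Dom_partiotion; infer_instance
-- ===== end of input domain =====

-- B replaces A's subtract-3-or-2 loop by the closed form ceil(area/3); objective: faster (O(1) vs O(area)).


-- ===== PORT A =====
-- the while loop of A, step for step: state (area, counter)
def partiotionLoop (area : Int) (counter : Int) : Int :=
  if _h : area > 0 then
    if area - 3 == 0 || area - 3 > 2 then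
      partiotionLoop (area - 3) (counter + 1)
    else
      partiotionLoop (area - 2) (counter + 1)
  else counter
termination_by area.toNat
decreasing_by all_goals omega

def partiotion (lenght : Int) (height : Int) : Int :=
  partiotionLoop (lenght * height) 0

-- ===== PORT B =====
def partiotion_alt (lenght : Int) (height : Int) : Int :=
  let area := lenght * height
  if area ≤ 0 then 0 else PySem.Int.floordiv (area + 2) 3

-- ===== PRECONDITION & SPEC =====
def Spec_partiotion (lenght : Int) (height : Int) (out : Int) : Prop := out = partiotion_alt lenght height
instance (lenght : Int) (height : Int) (out : Int) : Decidable (Spec_partiotion lenght height out) := by unfold Spec_partiotion; infer_instance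

-- ===== CLAIM (what is proved, stated in full; the proofs are below) =====
def Claim_equal_partiotion : Prop := ∀ (lenght : Int) (height : Int), Dom_partiotion lenght height → Spec_partiotion lenght height (partiotion lenght height)

-- ===== LEMMAS AND PROOFS =====
-- closed form of the loop
def pvClosed (area : Int) : Int := if area ≤ 0 then 0 else PySem.Int.floordiv (area + 2) 3

theorem pvClosed_eq (a : Int) (ha : ¬ a ≤ 0) : pvClosed a = (a + 2) / 3 := by
  simp only [pvClosed, if_neg ha]
  exact PySem.Int.floordiv_eq_ediv_of_pos (by omega)

theorem partiotionLoop_eq (area counter : Int) :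
    partiotionLoop area counter = counter + pvClosed area := by
  induction area, counter using partiotionLoop.induct with
  | case1 a c h hc ih =>
    rw [partiotionLoop, dif_pos h, if_pos hc, ih]
    simp only [beq_iff_eq, decide_eq_true_eq, Bool.or_eq_true] at hc
    by_cases h3 : a - 3 ≤ 0
    · have ha3 : a = 3 := by omega
      subst ha3
      simp [pvClosed, PySem.Int.floordiv]
    · rw [pvClosed_eq a (by omega), pvClosed_eq (a - 3) h3]
      omega
  | case2 a c h hc ih =>
    rw [partiotionLoop, dif_pos h, if_neg hc, ih]
    simp only [beq_iff_eq, decide_eq_true_eq, Bool.or_eq_true, not_or] at hc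
    -- here 0 < a, a ≠ 3, a ≤ 5: a ∈ {1,2,4,5}
    have h1 : 1 ≤ a := by omega
    have h2 : a ≤ 5 := by omega
    interval_cases a <;> simp [pvClosed, PySem.Int.floordiv] <;> omega
  | case3 a c h =>
    rw [partiotionLoop, dif_neg h]
    simp [pvClosed, not_lt.mp h]

-- ===== VERDICT (by name: the statement is the Claim_ definition above) =====
theorem partiotion_spec : Claim_equal_partiotion := by
  intro l h _
  unfold Spec_partiotion partiotion partiotion_alt
  rw [partiotionLoop_eq]
  simp [pvClosed]
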